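-- pv_equiv track=rewrite | github.com/nribjoaovictor/python_exercicios | tad/paragrafo.py | maior_palavra
-- ===== SOURCE A (Python) =====
-- def maior_palavra(texto):
--     maior=0
--     palavra=""
--     for i in range(len(texto)):
--         for k in range(len(texto[i])):
--             if len(texto[i][k]) > maior:
--                 maior=len(texto[i][k])
--                 palavra=texto[i][k]
--     return (maior ,palavra)
-- ===== SOURCE B (Python) =====
-- def maior_palavra(texto):
--     palavras = [w for linha in texto for w in linha]
--     maior = max((len(w) for w in palavras), default=0)
--     palavra = next((w for w in palavras if len(w) == maior), "")
--     return (maior, palavra)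
-- ===== Notes on version B (the rewrite author's own statement) =====
-- stated objective: idiomatic
-- what changed: Replaces the nested index loops maintaining a running (max,word) pair with flatten + max(...,default=0) for the length and a first-match search for the word.
import Mathlib
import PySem

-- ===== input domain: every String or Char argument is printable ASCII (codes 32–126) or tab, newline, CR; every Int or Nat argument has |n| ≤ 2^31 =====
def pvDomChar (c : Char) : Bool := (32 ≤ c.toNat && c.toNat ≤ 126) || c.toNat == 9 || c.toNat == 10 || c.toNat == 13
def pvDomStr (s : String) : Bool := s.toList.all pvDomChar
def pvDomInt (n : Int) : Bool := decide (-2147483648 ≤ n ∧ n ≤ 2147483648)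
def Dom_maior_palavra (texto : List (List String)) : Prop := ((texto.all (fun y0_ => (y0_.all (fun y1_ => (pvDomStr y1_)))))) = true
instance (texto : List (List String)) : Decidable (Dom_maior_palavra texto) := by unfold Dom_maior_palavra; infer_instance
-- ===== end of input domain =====

-- B replaces A's nested index loops maintaining a running (max, word) pair by
-- flatten + max(..., default=0) for the length and a first-match search for the word (different decomposition, same cost).


-- ===== PORT A =====
def maior_palavra (texto : List (List String)) : Int × String :=
  (PySem.List.pyRange 0 (PySem.List.len texto) 1).foldl (fun st i =>
    let linha := PySem.List.pyGetD texto i []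
    (PySem.List.pyRange 0 (PySem.List.len linha) 1).foldl (fun st2 k =>
      let w := PySem.List.pyGetD linha k ""
      if st2.1 < PySem.Str.len w then (PySem.Str.len w, w) else st2) st)
    ((0 : Int), "")

-- ===== PORT B =====
def maior_palavra_alt (texto : List (List String)) : Int × String :=
  let palavras := texto.flatMap (fun linha => linha)
  let maior := PySem.List.maxD (palavras.map (fun w => PySem.Str.len w)) (fun x => x) 0
  let palavra := (palavras.find? (fun w => PySem.Str.len w == maior)).getD ""
  (maior, palavra)

-- ===== PRECONDITION & SPEC =====
def Spec_maior_palavra (texto : List (List String)) (out : Int × String) : Prop := out = maior_palavra_alt texto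
instance (texto : List (List String)) (out : Int × String) : Decidable (Spec_maior_palavra texto out) := by unfold Spec_maior_palavra; infer_instance

-- ===== CLAIM (what is proved, stated in full; the proofs are below) =====
def Claim_equal_maior_palavra : Prop := ∀ (texto : List (List String)), Dom_maior_palavra texto → Spec_maior_palavra texto (maior_palavra texto)

-- ===== LEMMAS AND PROOFS =====

-- A's loop body on one word
def pvStep (st : Int × String) (w : String) : Int × String :=
  if st.1 < PySem.Str.len w then (PySem.Str.len w, w) else st

-- running maximum of lengths
def pvMax (ws : List String) (m : Int) : Int :=
  ws.foldl (fun a w => max a (PySem.Str.len w)) m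

theorem le_pvMax (ws : List String) (m : Int) : m ≤ pvMax ws m := by
  induction ws generalizing m with
  | nil => simp [pvMax]
  | cons w t ih =>
      have := ih (max m (PySem.Str.len w))
      exact le_trans (le_max_left _ _) this

theorem pvMax_eq_or_mem (ws : List String) (m : Int) :
    pvMax ws m = m ∨ ∃ w ∈ ws, PySem.Str.len w = pvMax ws m := by
  induction ws generalizing m with
  | nil => simp [pvMax]
  | cons w t ih =>
      have hM : pvMax (w :: t) m = pvMax t (max m (PySem.Str.len w)) := rfl
      rcases ih (max m (PySem.Str.len w)) with h1 | ⟨w', hw', hlen⟩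
      · by_cases hle : PySem.Str.len w ≤ m
        · left; rw [hM, h1]; omega
        · right; exact ⟨w, List.mem_cons_self, by rw [hM, h1]; omega⟩
      · right; exact ⟨w', List.mem_cons_of_mem _ hw', by rw [hM, ← hlen]⟩

theorem pvStep_loop (ws : List String) (m : Int) (p : String) :
    ws.foldl pvStep (m, p) =
      (pvMax ws m,
       if m = pvMax ws m then p
       else ((ws.find? (fun w => PySem.Str.len w == pvMax ws m)).getD p)) := by
  induction ws generalizing m p with
  | nil => simp [pvMax]
  | cons w t ih =>
      have hM : pvMax (w :: t) m = pvMax t (max m (PySem.Str.len w)) := rfl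
      by_cases h : m < PySem.Str.len w
      · have hmax : max m (PySem.Str.len w) = PySem.Str.len w := max_eq_right h.le
        have hstep : pvStep (m, p) w = (PySem.Str.len w, w) := by
          rw [pvStep, if_pos h]
        rw [List.foldl_cons, hstep, ih, hM, hmax]
        have hle := le_pvMax t (PySem.Str.len w)
        have hmne : m ≠ pvMax t (PySem.Str.len w) := by omega
        rw [if_neg hmne]
        by_cases hw : PySem.Str.len w = pvMax t (PySem.Str.len w)
        · rw [if_pos hw,
              List.find?_cons_of_pos (by simpa using hw), Option.getD_some]
        · rw [if_neg hw, List.find?_cons_of_neg (by simpa using hw)]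
          obtain ⟨w', hw', hlen⟩ : ∃ w' ∈ t, PySem.Str.len w' = pvMax t (PySem.Str.len w) := by
            rcases pvMax_eq_or_mem t (PySem.Str.len w) with h1 | h2
            · exact absurd h1.symm hw
            · exact h2
          cases hf : t.find? (fun w'' => PySem.Str.len w'' == pvMax t (PySem.Str.len w)) with
          | none =>
              exact absurd (by simpa using hlen) (List.find?_eq_none.mp hf w' hw')
          | some y => rfl
      · have hlw : PySem.Str.len w ≤ m := not_lt.mp h
        have hmax : max m (PySem.Str.len w) = m := max_eq_left hlw
        have hstep : pvStep (m, p) w = (m, p) := by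
          rw [pvStep, if_neg h]
        rw [List.foldl_cons, hstep, ih, hM, hmax]
        by_cases hm : m = pvMax t m
        · rw [if_pos hm, if_pos hm]
        · have hlt := lt_of_le_of_ne (le_pvMax t m) hm
          have hwne : ¬ PySem.Str.len w = pvMax t m := by omega
          rw [if_neg hm, if_neg hm, List.find?_cons_of_neg (by simpa using hwne)]

theorem str_len_nonneg (w : String) : 0 ≤ PySem.Str.len w := by
  simp [PySem.Str.len]

theorem maxD_eq_pvMax (ws : List String) :
    PySem.List.maxD (ws.map (fun w => PySem.Str.len w)) (fun x => x) 0 = pvMax ws 0 := by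
  cases ws with
  | nil => rfl
  | cons w t =>
      have h0 : max 0 (PySem.Str.len w) = PySem.Str.len w :=
        max_eq_right (str_len_nonneg w)
      unfold PySem.List.maxD
      rw [List.map_cons, PySem.List.max?_id_cons, Option.getD_some, List.foldl_map]
      show _ = pvMax t (max 0 (PySem.Str.len w))
      rw [h0]; rfl

theorem str_len_zero (w : String) (h : PySem.Str.len w = 0) : w = "" := by
  simp only [PySem.Str.len, Nat.cast_eq_zero, List.length_eq_zero_iff] at h
  exact String.toList_inj.mp (by simp [h])

theorem A_eq_flat (texto : List (List String)) :
    maior_palavra texto = (texto.flatMap (fun linha => linha)).foldl pvStep (0, "") := by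
  unfold maior_palavra
  simp only [PySem.List.len_eq]
  have inner : ∀ (linha : List String) (st : Int × String),
      (PySem.List.pyRange 0 (linha.length : Int) 1).foldl (fun st2 k =>
        let w := PySem.List.pyGetD linha k ""
        if st2.1 < PySem.Str.len w then (PySem.Str.len w, w) else st2) st
      = linha.foldl pvStep st := fun linha st =>
    PySem.List.foldl_pyRange_zero_pyGetD' linha "" pvStep st
  simp only [inner]
  rw [PySem.List.foldl_pyRange_zero_pyGetD' texto ([] : List String)
        (fun st linha => linha.foldl pvStep st) ((0 : Int), "")]
  exact List.foldl_flatMap.symm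

-- ===== VERDICT (by name: the statement is the Claim_ definition above) =====
theorem maior_palavra_spec : Claim_equal_maior_palavra := by
  intro texto _
  unfold Spec_maior_palavra
  rw [A_eq_flat, pvStep_loop]
  simp only [maior_palavra_alt]
  rw [maxD_eq_pvMax]
  by_cases h0 : (0 : Int) = pvMax (texto.flatMap (fun linha => linha)) 0
  · rw [if_pos h0]
    cases hf : (texto.flatMap (fun linha => linha)).find?
        (fun w => PySem.Str.len w == pvMax (texto.flatMap (fun linha => linha)) 0) with
    | none => rfl
    | some y =>
        have h1 := List.find?_some hf
        rw [← h0] at h1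
        have hy : PySem.Str.len y = 0 := beq_iff_eq.mp h1
        rw [Option.getD_some, str_len_zero y hy]
  · rw [if_neg h0]
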